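-- pv_equiv track=rewrite | github.com/AlifH2000/DCU-Networks | main.py | all_zeros
-- ===== SOURCE A (Python) =====
-- def decimal_to_binary(endpoint):
--     tmp = [] # Use an empty list
--     for value in endpoint:
--         if value == "0":
--             tmp.append("00000000")
--         else:
--             change = bin(int(value))
--             change = change[2:]
--             tmp.append(change)
--     Total = ".".join(tmp)
--     # Add it to the total at the end
--     return Total
--
-- def all_zeros(endpoint):
--     in_binary = decimal_to_binary(endpoint)
--     a = 0
--     for i in in_binary:
--         if i == "0":
--             a = a + 1
--     if a == 0:
--         a = 1
--     return a
-- ===== SOURCE B (Python) =====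
-- def all_zeros(endpoint):
--     total = 0
--     for value in endpoint:
--         if value == "0":
--             total += 8
--         else:
--             total += bin(int(value))[2:].count("0")
--     return total if total != 0 else 1
-- ===== Notes on version B (the rewrite author's own statement) =====
-- stated objective: simpler
-- what changed: B drops the helper that builds a list of binary strings and joins them with '.' before scanning the joined string character by character; instead it makes one pass over endpoint, summing a per-value zero count (8 for "0", else bin(int(value))[2:].count('0')), returning 1 when the sum is 0.
import Mathlib
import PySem

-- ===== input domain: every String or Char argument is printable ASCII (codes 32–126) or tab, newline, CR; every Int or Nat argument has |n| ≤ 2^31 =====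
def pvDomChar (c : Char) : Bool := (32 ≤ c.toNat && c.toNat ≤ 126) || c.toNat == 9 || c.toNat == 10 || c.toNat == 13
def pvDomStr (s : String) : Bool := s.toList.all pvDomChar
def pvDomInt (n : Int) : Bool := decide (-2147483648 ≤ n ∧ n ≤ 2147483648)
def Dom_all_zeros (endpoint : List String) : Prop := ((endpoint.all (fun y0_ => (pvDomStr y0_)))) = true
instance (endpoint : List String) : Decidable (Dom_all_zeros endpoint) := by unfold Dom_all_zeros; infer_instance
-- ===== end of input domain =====

-- B replaces A's build-list/join/scan-characters pipeline by a single summing pass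
-- over the endpoint (objective: simpler; same asymptotic cost).

-- ===== PORT A =====
-- A's helper: build the list of binary strings and join with "." .
-- int(value) raises ValueError exactly when ofStr? = none; those inputs are outside
-- Pre_all_zeros, so the `getD 0` placeholder is never reached on admitted inputs.
def decimal_to_binary (endpoint : List String) : String :=
  let tmp : List String := endpoint.foldl (fun tmp value =>
    if value == "0" then
      tmp ++ ["00000000"]
    else
      let change := PySem.Int.pyBin ((PySem.Int.ofStr? value).getD 0)
      let change := PySem.Str.slice change (some 2) none
      tmp ++ [change]) []
  PySem.Str.join "." tmp

def all_zeros (endpoint : List String) : Int :=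
  let in_binary := decimal_to_binary endpoint
  let a : Int := in_binary.toList.foldl (fun a i => if i == '0' then a + 1 else a) 0
  if a == 0 then 1 else a

-- ===== PORT B =====
def all_zeros_alt (endpoint : List String) : Int :=
  let total : Int := endpoint.foldl (fun total value =>
    if value == "0" then
      total + 8
    else
      total + (PySem.Str.count
        (PySem.Str.slice (PySem.Int.pyBin ((PySem.Int.ofStr? value).getD 0)) (some 2) none)
        "0" : Int)) 0
  if total != 0 then total else 1

-- ===== PRECONDITION & SPEC =====
-- Pre_ excludes exactly the inputs where int(value) raises ValueError in both A and B.
def Pre_all_zeros (endpoint : List String) : Prop :=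
  ∀ v ∈ endpoint, (PySem.Int.ofStr? v).isSome = true
instance (endpoint : List String) : Decidable (Pre_all_zeros endpoint) := by
  unfold Pre_all_zeros; infer_instance

def pvWitness_all_zeros : List String := ["5", "0", "-12"]

def Spec_all_zeros (endpoint : List String) (out : Int) : Prop := out = all_zeros_alt endpoint
instance (endpoint : List String) (out : Int) : Decidable (Spec_all_zeros endpoint out) := by unfold Spec_all_zeros; infer_instance

-- ===== CLAIM (what is proved, stated in full; the proofs are below) =====
def Claim_equal_all_zeros : Prop := ∀ (endpoint : List String), Dom_all_zeros endpoint → Pre_all_zeros endpoint → Spec_all_zeros endpoint (all_zeros endpoint)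

-- ===== LEMMAS AND PROOFS =====

-- the binary string A appends for one endpoint value
def pieceA (value : String) : String :=
  if value == "0" then "00000000"
  else PySem.Str.slice (PySem.Int.pyBin ((PySem.Int.ofStr? value).getD 0)) (some 2) none

-- the per-value zero count B adds
def zc (value : String) : Nat := (pieceA value).toList.count '0'

theorem foldlA_eq_map (l : List String) (acc : List String) :
    l.foldl (fun tmp value =>
      if value == "0" then tmp ++ ["00000000"]
      else
        let change := PySem.Int.pyBin ((PySem.Int.ofStr? value).getD 0)
        let change := PySem.Str.slice change (some 2) none
        tmp ++ [change]) acc = acc ++ l.map pieceA := by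
  induction l generalizing acc with
  | nil => simp
  | cons h t ih =>
    simp only [List.foldl_cons]
    rw [ih]
    by_cases hc : h == "0" <;> simp [pieceA, hc]

theorem count_join_dot (parts : List String) :
    (PySem.Chars.join ['.'] (parts.map String.toList)).count '0'
      = (parts.map (fun p => p.toList.count '0')).sum := by
  induction parts with
  | nil => simp [PySem.Chars.join_nil]
  | cons p rest ih =>
    cases rest with
    | nil => simp [PySem.Chars.join_singleton]
    | cons q rest' =>
      simp only [List.map_cons] at ih ⊢
      rw [PySem.Chars.join_cons_cons]
      simp [List.count_append, ih]

theorem go_single (c : Char) : ∀ (cs : List Char) (fuel acc : Nat), cs.length ≤ fuel →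
    PySem.Chars.count.go [c] fuel cs acc = acc + cs.count c := by
  intro cs
  induction cs with
  | nil => intro fuel acc _; cases fuel <;> simp [PySem.Chars.count.go]
  | cons h t ih =>
    intro fuel acc hf
    simp only [List.length_cons] at hf
    cases fuel with
    | zero => omega
    | succ f =>
      rw [PySem.Chars.count.go]
      simp only [List.isPrefixOf, Bool.and_true, List.length_cons, List.length_nil,
        List.drop_succ_cons, List.drop_zero]
      by_cases hc : c = h
      · subst hc
        simp only [BEq.rfl, if_pos, ih f (acc + 1) (by omega), List.count_cons_self]
        omega
      · have : (c == h) = false := by simpa using hc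
        simp only [this, Bool.false_eq_true, if_false, ih f acc (by omega), List.count_cons,
          beq_iff_eq]
        rw [if_neg (fun h' => hc h'.symm)]
        omega

theorem chars_count_single (cs : List Char) (c : Char) :
    PySem.Chars.count cs [c] = cs.count c := by
  simp [PySem.Chars.count, go_single c cs cs.length 0 le_rfl]

theorem foldlB_eq_sum (l : List String) (t0 : Int) :
    l.foldl (fun total value =>
      if value == "0" then total + 8
      else total + (PySem.Str.count
        (PySem.Str.slice (PySem.Int.pyBin ((PySem.Int.ofStr? value).getD 0)) (some 2) none)
        "0" : Int)) t0 = t0 + ((l.map zc).sum : Int) := by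
  induction l generalizing t0 with
  | nil => simp
  | cons h t ih =>
    by_cases hc : h == "0"
    · have hz : zc h = 8 := by simp [zc, pieceA, hc]
      simp only [List.foldl_cons, hc, if_pos, ih, List.map_cons, List.sum_cons, hz]
      push_cast; ring
    · have hz : (PySem.Str.count
          (PySem.Str.slice (PySem.Int.pyBin ((PySem.Int.ofStr? h).getD 0)) (some 2) none)
          "0") = zc h := by
        rw [PySem.Str.count_eq]
        show PySem.Chars.count _ ['0'] = _
        rw [chars_count_single]
        simp [zc, pieceA, hc]
      simp only [List.foldl_cons, hc, Bool.false_eq_true, if_false, ih, List.map_cons,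
        List.sum_cons, hz]
      push_cast; ring

theorem countA_eq_sum (endpoint : List String) :
    (decimal_to_binary endpoint).toList.count '0' = ((endpoint.map zc).sum) := by
  unfold decimal_to_binary
  rw [foldlA_eq_map, List.nil_append, PySem.Str.toList_join]
  show (PySem.Chars.join ['.'] ((endpoint.map pieceA).map String.toList)).count '0' = _
  rw [count_join_dot, List.map_map]
  rfl

-- ===== VERDICT (by name: the statement is the Claim_ definition above) =====
theorem all_zeros_spec : Claim_equal_all_zeros := by
  intro endpoint _ _
  unfold Spec_all_zeros all_zeros all_zeros_alt
  dsimp only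
  rw [PySem.List.foldl_beq_add_one, foldlB_eq_sum, countA_eq_sum]
  simp only [zero_add]
  by_cases h : ((endpoint.map zc).sum : Int) = 0
  · simp
  · simp
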